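-- pv_equiv track=rewrite | github.com/vovanchuk-ua/HW-Python | laba4/mainTwo.py | findMaxOfMins
-- ===== SOURCE A (Python) =====
-- def findMaxOfMins(matrix):
--     minElements = []
--     for row in matrix:
--         minElements.append(min(row))
--     maxOfMins = minElements[0]
--     for element in minElements:
--         if element > maxOfMins:
--             maxOfMins = element
--     indices = []
--     for i, row in enumerate(matrix):
--         if min(row) == maxOfMins:
--             indices.append((i, row.index(maxOfMins)))
--     return maxOfMins, indices
-- ===== SOURCE B (Python) =====
-- def findMaxOfMins(matrix):
--     # One pass: running max of row minimums with reset-on-new-max index list.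
--     best = min(matrix[0])
--     indices = []
--     for i, row in enumerate(matrix):
--         mn = min(row)
--         if mn > best:
--             best = mn
--             indices = [(i, row.index(mn))]
--         elif mn == best:
--             indices.append((i, row.index(mn)))
--     return best, indices
-- ===== Notes on version B (the rewrite author's own statement) =====
-- stated objective: alternative
-- what changed: Replaces A's three passes (build a minimums list, scan it for the max, rescan every row recomputing min(row)) with a single pass keeping a running max and a reset-on-new-max index list.
import Mathlib
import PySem

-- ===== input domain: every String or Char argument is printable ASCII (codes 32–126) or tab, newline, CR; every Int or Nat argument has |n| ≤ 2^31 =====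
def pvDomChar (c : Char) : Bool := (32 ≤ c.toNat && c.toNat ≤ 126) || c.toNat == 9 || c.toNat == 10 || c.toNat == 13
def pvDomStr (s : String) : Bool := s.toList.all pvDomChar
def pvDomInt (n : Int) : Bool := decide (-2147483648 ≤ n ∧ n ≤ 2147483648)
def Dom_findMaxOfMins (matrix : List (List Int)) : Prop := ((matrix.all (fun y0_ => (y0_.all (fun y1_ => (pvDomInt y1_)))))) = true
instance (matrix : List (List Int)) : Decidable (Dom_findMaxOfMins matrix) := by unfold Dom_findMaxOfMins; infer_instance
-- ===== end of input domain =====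

-- B folds A's three passes (minimums list, max scan, rescan of all rows) into a single pass
-- keeping a running max and a reset-on-new-max index list (same asymptotic cost).

-- ===== PORT A =====
-- literal transliteration of A; min(row) on an empty row and minElements[0] on an empty
-- matrix raise in Python (outside Pre_), here guarded with .getD 0
def findMaxOfMins (matrix : List (List Int)) : Int × (List (Int × Int)) :=
  let minElements := matrix.foldl
    (fun acc row => acc ++ [(PySem.List.min? row (fun x => x)).getD 0]) []
  let maxOfMins := minElements.foldl
    (fun mx e => if e > mx then e else mx) ((PySem.List.pyGet? minElements 0).getD 0)
  let indices := (PySem.List.enumerate matrix 0).foldl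
    (fun acc p =>
      if (PySem.List.min? p.2 (fun x => x)).getD 0 = maxOfMins then
        acc ++ [(p.1, (Int.ofNat ((PySem.List.index? p.2 maxOfMins).getD 0)))]
      else acc) []
  (maxOfMins, indices)

-- ===== PORT B =====
def findMaxOfMins_alt (matrix : List (List Int)) : Int × (List (Int × Int)) :=
  match matrix with
  | [] => (0, [])   -- Python raises here (outside Pre_)
  | r0 :: _ =>
    (PySem.List.enumerate matrix 0).foldl
      (fun (st : Int × List (Int × Int)) (p : Int × List Int) =>
        let mn := (PySem.List.min? p.2 (fun x => x)).getD 0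
        if mn > st.1 then
          (mn, [(p.1, (Int.ofNat ((PySem.List.index? p.2 mn).getD 0)))])
        else if mn = st.1 then
          (st.1, st.2 ++ [(p.1, (Int.ofNat ((PySem.List.index? p.2 mn).getD 0)))])
        else st)
      ((PySem.List.min? r0 (fun x => x)).getD 0, [])

-- ===== PRECONDITION & SPEC =====
-- Pre_ excludes exactly the inputs where Python A raises: the empty matrix (IndexError) and
-- matrices with an empty row (ValueError from min([])).
def Pre_findMaxOfMins (matrix : List (List Int)) : Prop :=
  matrix ≠ [] ∧ ∀ row ∈ matrix, row ≠ []
instance (matrix : List (List Int)) : Decidable (Pre_findMaxOfMins matrix) := by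
  unfold Pre_findMaxOfMins; infer_instance
def pvWitness_findMaxOfMins : List (List Int) := [[3, 1], [2, 2]]

def Spec_findMaxOfMins (matrix : List (List Int)) (out : Int × (List (Int × Int))) : Prop := out = findMaxOfMins_alt matrix
instance (matrix : List (List Int)) (out : Int × (List (Int × Int))) : Decidable (Spec_findMaxOfMins matrix out) := by unfold Spec_findMaxOfMins; infer_instance

-- ===== CLAIM (what is proved, stated in full; the proofs are below) =====
def Claim_equal_findMaxOfMins : Prop := ∀ (matrix : List (List Int)), Dom_findMaxOfMins matrix → Pre_findMaxOfMins matrix → Spec_findMaxOfMins matrix (findMaxOfMins matrix)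

-- ===== LEMMAS AND PROOFS =====

-- row minimum as both ports compute it
def mnRow (row : List Int) : Int := (PySem.List.min? row (fun x => x)).getD 0
-- first index of v in row as both ports compute it
def idxIn (row : List Int) (v : Int) : Int := Int.ofNat ((PySem.List.index? row v).getD 0)
-- A's running-max step
def stepMax (mx e : Int) : Int := if e > mx then e else mx
-- the selected (row, column) pairs for target value M, rows numbered from k
def sel (rs : List (List Int)) (k M : Int) : List (Int × Int) :=
  match rs with
  | [] => []
  | r :: rest => (if mnRow r = M then [(k, idxIn r M)] else []) ++ sel rest (k + 1) M

theorem le_foldl_stepMax (ms : List Int) : ∀ b : Int, b ≤ ms.foldl stepMax b := by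
  induction ms with
  | nil => intro b; simp
  | cons m ms ih =>
    intro b
    have h1 : b ≤ stepMax b m := by unfold stepMax; split_ifs <;> omega
    simpa [List.foldl] using le_trans h1 (ih (stepMax b m))

theorem a_indices_eq_sel (rs : List (List Int)) :
    ∀ (k : Int) (acc : List (Int × Int)) (M : Int),
    (PySem.List.enumerate rs k).foldl
      (fun acc p =>
        if (PySem.List.min? p.2 (fun x => x)).getD 0 = M then
          acc ++ [(p.1, (Int.ofNat ((PySem.List.index? p.2 M).getD 0)))]
        else acc) acc
    = acc ++ sel rs k M := by
  induction rs with
  | nil => intro k acc M; simp [PySem.List.enumerate_nil, sel]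
  | cons r rest ih =>
    intro k acc M
    rw [PySem.List.enumerate_cons]
    simp only [List.foldl_cons]
    by_cases h : mnRow r = M
    · rw [if_pos (show (PySem.List.min? r (fun x => x)).getD 0 = M from h)]
      rw [ih]
      simp only [sel, if_pos h, idxIn]
      simp [List.append_assoc]
    · rw [if_neg (show ¬ (PySem.List.min? r (fun x => x)).getD 0 = M from h)]
      rw [ih]
      simp [sel, h]

theorem b_loop_eq (rs : List (List Int)) :
    ∀ (k : Int) (b : Int) (L : List (Int × Int)),
    (PySem.List.enumerate rs k).foldl
      (fun (st : Int × List (Int × Int)) (p : Int × List Int) =>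
        if (PySem.List.min? p.2 (fun x => x)).getD 0 > st.1 then
          ((PySem.List.min? p.2 (fun x => x)).getD 0,
            [(p.1, (Int.ofNat ((PySem.List.index? p.2 ((PySem.List.min? p.2 (fun x => x)).getD 0)).getD 0)))])
        else if (PySem.List.min? p.2 (fun x => x)).getD 0 = st.1 then
          (st.1, st.2 ++ [(p.1, (Int.ofNat ((PySem.List.index? p.2 ((PySem.List.min? p.2 (fun x => x)).getD 0)).getD 0)))])
        else st)
      (b, L)
    = ((rs.map mnRow).foldl stepMax b,
       (if (rs.map mnRow).foldl stepMax b > b then [] else L)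
         ++ sel rs k ((rs.map mnRow).foldl stepMax b)) := by
  induction rs with
  | nil => intro k b L; simp [PySem.List.enumerate_nil, sel]
  | cons r rest ih =>
    intro k b L
    rw [PySem.List.enumerate_cons]
    simp only [List.foldl_cons, List.map_cons]
    simp only [show (PySem.List.min? r (fun x => x)).getD 0 = mnRow r from rfl]
    have hM' := le_foldl_stepMax (rest.map mnRow)
    rcases lt_trichotomy b (mnRow r) with hlt | heq | hgt
    · -- new max: reset
      rw [if_pos (show mnRow r > b from hlt)]
      rw [ih]
      simp only [show stepMax b (mnRow r) = mnRow r from by unfold stepMax; simp [hlt]]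
      have hmM : mnRow r ≤ (rest.map mnRow).foldl stepMax (mnRow r) := hM' (mnRow r)
      set M' := (rest.map mnRow).foldl stepMax (mnRow r) with hMdef
      rw [if_pos (show M' > b by omega)]
      rcases eq_or_lt_of_le hmM with he | hl
      · rw [if_neg (show ¬ M' > mnRow r by omega)]
        simp [sel, ← he, idxIn]
      · rw [if_pos hl]
        simp [sel, show mnRow r ≠ M' by omega]
    · -- equal: append
      rw [if_neg (show ¬ mnRow r > b by omega), if_pos (show mnRow r = b from heq.symm)]
      rw [ih]
      simp only [show stepMax b (mnRow r) = b from by unfold stepMax; simp [heq]]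
      have hbM : b ≤ (rest.map mnRow).foldl stepMax b := hM' b
      set M' := (rest.map mnRow).foldl stepMax b with hMdef
      rcases eq_or_lt_of_le hbM with he | hl
      · rw [if_neg (show ¬ M' > b by omega), if_neg (show ¬ M' > b by omega)]
        simp [sel, show mnRow r = M' by omega, idxIn, show (M' : Int) = b from he.symm,
              List.append_assoc]
      · rw [if_pos hl, if_pos hl]
        simp [sel, show mnRow r ≠ M' by omega]
    · -- smaller: skip
      rw [if_neg (show ¬ mnRow r > b by omega), if_neg (show ¬ mnRow r = b by omega)]
      rw [ih]
      simp only [show stepMax b (mnRow r) = b from by unfold stepMax; simp; omega]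
      have hbM : b ≤ (rest.map mnRow).foldl stepMax b := hM' b
      set M' := (rest.map mnRow).foldl stepMax b with hMdef
      simp [sel, show mnRow r ≠ M' by omega]

theorem minElements_eq_map (matrix : List (List Int)) :
    matrix.foldl (fun acc row => acc ++ [(PySem.List.min? row (fun x => x)).getD 0]) []
    = matrix.map mnRow := by
  simpa [mnRow] using
    (PySem.List.foldl_append_singleton_eq_map (l := matrix)
      (f := fun row => (PySem.List.min? row (fun x => x)).getD 0) (acc := []))

-- ===== VERDICT (by name: the statement is the Claim_ definition above) =====
theorem findMaxOfMins_spec : Claim_equal_findMaxOfMins := by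
  intro matrix _ _
  unfold Spec_findMaxOfMins findMaxOfMins findMaxOfMins_alt
  match matrix with
  | [] => simp [PySem.List.enumerate_nil, PySem.List.pyGet?]
  | r0 :: rest =>
    rw [minElements_eq_map]
    simp only [List.map_cons]
    have h0 : (PySem.List.pyGet? (mnRow r0 :: rest.map mnRow) 0).getD 0 = mnRow r0 := by
      simp [PySem.List.pyGet?, PySem.List.pyIdx?]
    rw [h0]
    have hfun : (fun (mx e : Int) => if e > mx then e else mx) = stepMax := rfl
    rw [hfun]
    rw [a_indices_eq_sel (r0 :: rest) 0 []]
    rw [b_loop_eq (r0 :: rest) 0 ((PySem.List.min? r0 (fun x => x)).getD 0) []]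
    simp only [show (PySem.List.min? r0 (fun x => x)).getD 0 = mnRow r0 from rfl,
      List.map_cons, List.foldl_cons,
      show stepMax (mnRow r0) (mnRow r0) = mnRow r0 from by unfold stepMax; simp]
    simp
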